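-- pv_equiv track=rewrite | github.com/Dali918/CCNY-CSC221-Software_Design_Lab | homework_4_board_solver/main.py | solve_matrix
-- ===== SOURCE A (Python) =====
-- def recurse(curr_int, i, j, vector, cache, matrix):
--     x, y = vector[0] + i, vector[1] + j
--     if i < len(matrix) and j < len(matrix[0]) and j > -1 and matrix[i][j] == curr_int:
--         if cache[i][j] > 0:
--             return cache[i][j]
--         cache[i][j] = 1 + recurse(curr_int, x, y, vector, cache, matrix)
--         return cache[i][j]
--     else:
--         return 0
--
-- def max_directions(matrix, vector, row, col):
--
--     cache = [[0 for j in range(col)] for i in range(row)]   #start with empty cache for storing directional length from position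
--     max = -1        #start with max being -1
--     x, y = 0, 0
--     for i in range(row):
--         for j in range(col):
--             curr_int = matrix[i][j]
--             curr_max = recurse(curr_int, i, j, vector, cache, matrix)   #determine directional length from current index
--             if curr_max > max:      #update current directional maximum and starting index
--                 x, y = i, j
--                 max = curr_max
--
--     return x, y, max    #return starting index and step size
--
-- def solve_matrix(matrix):
--     row, col = len(matrix), len(matrix[0])
--     x,y,step = -1, -1, 0
--     directions = [(0, 1), (1, 1), (1, 0), (1, -1)]
--     longest = (0, 0)
--     for i in range(len(directions)):
--         """
--         Get Starting position (x,y), and step size for each direction vector then determine which one has has the longest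
--         """
--         curr_x,curr_y,curr_step= max_directions(matrix, directions[i], row, col)
--         if curr_step > step:
--             x,y,step, longest = curr_x, curr_y, curr_step, directions[i]
--
--     return x, y, step, longest
-- ===== SOURCE B (Python) =====
-- def solve_matrix(matrix):
--     rows, cols = len(matrix), len(matrix[0])
--     x, y, step, longest = -1, -1, 0, (0, 0)
--     for v in [(0, 1), (1, 1), (1, 0), (1, -1)]:
--         vx, vy = v
--         # bottom-up DP: dp[i][j] = length of the run of equal values starting at (i,j) along v
--         dp = [[1] * cols for _ in range(rows)]
--         for i in reversed(range(rows)):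
--             for j in reversed(range(cols)):
--                 ni, nj = i + vx, j + vy
--                 if ni < rows and 0 <= nj < cols and matrix[ni][nj] == matrix[i][j]:
--                     dp[i][j] = 1 + dp[ni][nj]
--         bx, by, bm = 0, 0, -1
--         for i in range(rows):
--             for j in range(cols):
--                 if dp[i][j] > bm:
--                     bx, by, bm = i, j, dp[i][j]
--         if bm > step:
--             x, y, step, longest = bx, by, bm, v
--     return x, y, step, longest
-- ===== Notes on version B (the rewrite author's own statement) =====
-- stated objective: alternative
-- what changed: Replaces A's top-down memoized recursion (a shared cache threaded through a per-cell recursive probe) with a bottom-up iterative DP that fills each direction's run-length table in reverse row-major order, then scans it.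
import Mathlib
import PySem

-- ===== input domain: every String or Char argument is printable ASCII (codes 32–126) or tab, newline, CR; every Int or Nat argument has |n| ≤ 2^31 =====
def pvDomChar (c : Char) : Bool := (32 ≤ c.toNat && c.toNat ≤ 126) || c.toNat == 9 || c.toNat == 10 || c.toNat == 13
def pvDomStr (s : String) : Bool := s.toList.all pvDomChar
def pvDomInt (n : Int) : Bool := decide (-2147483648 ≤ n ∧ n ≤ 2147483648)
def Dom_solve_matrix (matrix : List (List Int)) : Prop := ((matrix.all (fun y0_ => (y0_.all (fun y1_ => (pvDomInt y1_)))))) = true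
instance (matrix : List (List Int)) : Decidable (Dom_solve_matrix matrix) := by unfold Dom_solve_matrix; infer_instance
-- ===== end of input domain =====

-- B replaces A's top-down memoized recursion with a bottom-up iterative DP table per direction (alternative decomposition, same cost).

-- ===== PORT A =====
-- len(matrix[0]) (admitted inputs have a first row)
def pvCols (m : List (List Int)) : Int := ((PySem.List.pyGetD m 0 []).length : Int)

-- matrix[i][j] / cache[i][j] (all admitted reads are in range)
def pvGet (m : List (List Int)) (i j : Int) : Int :=
  PySem.List.pyGetD (PySem.List.pyGetD m i []) j 0

-- cache[i][j] = w (all writes the programs perform are in range)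
def pvSet (c : List (List Int)) (i j w : Int) : List (List Int) :=
  PySem.List.pySetD c i (PySem.List.pySetD (PySem.List.pyGetD c i []) j w)

-- recurse(curr_int, i, j, vector, cache, matrix); the fuel argument is only a totality
-- guard: 2*row+col steps always suffice, since each recursive call on an in-bounds cell
-- strictly decreases 2*(rows-i)+(cols-j) for all four direction vectors used
def recurseA (m : List (List Int)) (v : Int × Int) :
    Nat → Int → Int → Int → List (List Int) → Int × List (List Int)
  | 0, _, _, _, cache => (0, cache)
  | f + 1, curr, i, j, cache =>
    let x := v.1 + i
    let y := v.2 + j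
    if i < (m.length : Int) ∧ j < pvCols m ∧ j > -1 ∧ pvGet m i j = curr then
      if pvGet cache i j > 0 then (pvGet cache i j, cache)
      else
        let p := recurseA m v f curr x y cache
        (1 + p.1, pvSet p.2 i j (1 + p.1))
    else (0, cache)

-- max_directions(matrix, vector, row, col); the loop state is (cache, x, y, max)
def maxDirA (m : List (List Int)) (v : Int × Int) (row col : Int) : Int × Int × Int :=
  let cache : List (List Int) :=
    (PySem.List.pyRange 0 row 1).map (fun _ => (PySem.List.pyRange 0 col 1).map (fun _ => (0 : Int)))
  let st :=
    (PySem.List.pyRange 0 row 1).foldl (fun st i =>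
      (PySem.List.pyRange 0 col 1).foldl (fun st j =>
        let curr := pvGet m i j
        let p := recurseA m v (2 * row + col).toNat curr i j st.1
        if p.1 > st.2.2.2 then (p.2, i, j, p.1) else (p.2, st.2.1, st.2.2.1, st.2.2.2)) st) (cache, 0, 0, -1)
  (st.2.1, st.2.2.1, st.2.2.2)

def solve_matrix (matrix : List (List Int)) : Int × Int × Int × (Int × Int) :=
  let row : Int := (matrix.length : Int)
  let col : Int := pvCols matrix
  let directions : List (Int × Int) := [(0, 1), (1, 1), (1, 0), (1, -1)]
  (PySem.List.pyRange 0 (directions.length : Int) 1).foldl (fun st i =>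
    let d := PySem.List.pyGetD directions i (0, 0)
    let r := maxDirA matrix d row col
    if r.2.2 > st.2.2.1 then (r.1, r.2.1, r.2.2, d) else st)
    ((-1 : Int), (-1 : Int), (0 : Int), ((0 : Int), (0 : Int)))

-- ===== PORT B =====
-- bottom-up DP table for one direction: dp[i][j] = run length starting at (i,j) along v,
-- filled in reverse row-major order so each cell's neighbour is computed first
def altDp (m : List (List Int)) (v : Int × Int) (rows cols : Int) : List (List Int) :=
  let dp0 : List (List Int) :=
    (PySem.List.pyRange 0 rows 1).map (fun _ => PySem.List.pyRepeat [(1 : Int)] cols)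
  ((PySem.List.pyRange 0 rows 1).reverse).foldl (fun dp i =>
    ((PySem.List.pyRange 0 cols 1).reverse).foldl (fun dp j =>
      let ni := i + v.1
      let nj := j + v.2
      if ni < rows ∧ 0 ≤ nj ∧ nj < cols ∧ pvGet m ni nj = pvGet m i j then
        pvSet dp i j (1 + pvGet dp ni nj)
      else dp) dp) dp0

-- row-major scan for the first strictly-greatest dp entry; state (bx, by, bm)
def altScan (dp : List (List Int)) (rows cols : Int) : Int × Int × Int :=
  (PySem.List.pyRange 0 rows 1).foldl (fun s i =>
    (PySem.List.pyRange 0 cols 1).foldl (fun s j =>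
      if pvGet dp i j > s.2.2 then (i, j, pvGet dp i j) else s) s) (0, 0, -1)

def solve_matrix_alt (matrix : List (List Int)) : Int × Int × Int × (Int × Int) :=
  let rows : Int := (matrix.length : Int)
  let cols : Int := pvCols matrix
  [((0 : Int), (1 : Int)), (1, 1), (1, 0), (1, -1)].foldl (fun st v =>
    let r := altScan (altDp matrix v rows cols) rows cols
    if r.2.2 > st.2.2.1 then (r.1, r.2.1, r.2.2, v) else st)
    ((-1 : Int), (-1 : Int), (0 : Int), ((0 : Int), (0 : Int)))

-- ===== PRECONDITION & SPEC =====
-- Pre_ excludes exactly the inputs on which Python A raises IndexError: the empty matrix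
-- (A evaluates matrix[0]) and matrices with some row shorter than row 0 (A reads
-- matrix[i][j] for every j < len(matrix[0])). Rows longer than row 0 are admitted.
def Pre_solve_matrix (matrix : List (List Int)) : Prop :=
  matrix ≠ [] ∧ ∀ r ∈ matrix, (pvCols matrix).toNat ≤ r.length
instance (matrix : List (List Int)) : Decidable (Pre_solve_matrix matrix) := by
  unfold Pre_solve_matrix; infer_instance
def pvWitness_solve_matrix : List (List Int) := [[1, 1], [2, 1]]
def Spec_solve_matrix (matrix : List (List Int)) (out : Int × Int × Int × (Int × Int)) : Prop := out = solve_matrix_alt matrix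
instance (matrix : List (List Int)) (out : Int × Int × Int × (Int × Int)) : Decidable (Spec_solve_matrix matrix out) := by unfold Spec_solve_matrix; infer_instance

-- ===== CLAIM (what is proved, stated in full; the proofs are below) =====
def Claim_equal_solve_matrix : Prop := ∀ (matrix : List (List Int)), Dom_solve_matrix matrix → Pre_solve_matrix matrix → Spec_solve_matrix matrix (solve_matrix matrix)

-- ===== LEMMAS AND PROOFS =====
def Dims (m c : List (List Int)) : Prop :=
  c.length = m.length ∧ ∀ r ∈ c, r.length = (pvCols m).toNat

lemma pvGet_eq (c : List (List Int)) (a b : Int) (ha0 : 0 ≤ a) (ha : a.toNat < c.length)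
    (hb0 : 0 ≤ b) (hb : b.toNat < (c.getD a.toNat []).length) :
    pvGet c a b = (c.getD a.toNat []).getD b.toNat 0 := by
  have h1 := List.getD_eq_getElem c [] ha
  unfold pvGet
  rw [PySem.List.pyGetD_eq_getElem _ _ ha0 (by omega), ← h1,
      PySem.List.pyGetD_eq_getElem _ _ hb0 (by omega), List.getD_eq_getElem _ _ hb]

lemma Dims_pvSet (m c : List (List Int)) (hd : Dims m c) (i j w : Int)
    (hi0 : 0 ≤ i) (hi : i < (m.length : Int)) (hj0 : 0 ≤ j) :
    Dims m (pvSet c i j w) := by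
  obtain ⟨hl, hr⟩ := hd
  have hia : i.toNat < c.length := by omega
  unfold pvSet
  rw [PySem.List.pySetD_of_nonneg _ _ hi0, PySem.List.pyGetD_eq_getElem _ _ hi0 (by omega),
      PySem.List.pySetD_of_nonneg _ _ hj0]
  refine ⟨by simpa using hl, ?_⟩
  intro r hrm
  rcases List.mem_or_eq_of_mem_set hrm with h | h
  · exact hr r h
  · subst h; simpa using hr _ (List.getElem_mem hia)

lemma pvGet_pvSet (m c : List (List Int)) (hd : Dims m c) (i j w a b : Int)
    (hi0 : 0 ≤ i) (hi : i < (m.length : Int)) (hj0 : 0 ≤ j) (hj : j < pvCols m)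
    (ha0 : 0 ≤ a) (ha : a < (m.length : Int)) (hb0 : 0 ≤ b) (hb : b < pvCols m) :
    pvGet (pvSet c i j w) a b = if a = i ∧ b = j then w else pvGet c a b := by
  obtain ⟨hl, hr⟩ := hd
  have hia : i.toNat < c.length := by omega
  have haa : a.toNat < c.length := by omega
  have hri := List.getD_eq_getElem c [] hia
  have hra := List.getD_eq_getElem c [] haa
  have hrowi : (c.getD i.toNat []).length = (pvCols m).toNat := by
    rw [hri]; exact hr _ (List.getElem_mem hia)
  have hrowa : (c.getD a.toNat []).length = (pvCols m).toNat := by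
    rw [hra]; exact hr _ (List.getElem_mem haa)
  set c' := (c.getD i.toNat []).set j.toNat w with hc'
  have hcset : pvSet c i j w = c.set i.toNat c' := by
    unfold pvSet
    rw [PySem.List.pySetD_of_nonneg _ _ hi0, PySem.List.pyGetD_eq_getElem _ _ hi0 (by omega),
        PySem.List.pySetD_of_nonneg _ _ hj0, hc', hri]
  have hlenc' : c'.length = (pvCols m).toNat := by rw [hc', List.length_set, hrowi]
  have hset_get : (c.set i.toNat c').getD a.toNat [] =
      if a.toNat = i.toNat then c' else c.getD a.toNat [] := by
    rw [List.getD_eq_getElem _ _ (by simpa using haa), hra, List.getElem_set]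
    rcases eq_or_ne a.toNat i.toNat with hh | hh
    · simp [hh]
    · simp [hh, Ne.symm hh]
  rw [hcset, pvGet_eq _ _ _ ha0 (by simpa using haa) hb0 (by rw [hset_get]; split <;> omega)]
  rw [hset_get]
  by_cases hai : a = i
  · subst hai
    rw [if_pos rfl]
    by_cases hbj : b = j
    · subst hbj
      rw [if_pos ⟨rfl, rfl⟩, hc', List.getD_eq_getElem _ _ (by rw [List.length_set]; omega),
          List.getElem_set, if_pos rfl]
    · rw [if_neg (by tauto), hc',
          List.getD_eq_getElem _ _ (by rw [List.length_set]; omega), List.getElem_set,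
          if_neg (by omega), pvGet_eq c a b ha0 haa hb0 (by omega)]
      exact (List.getD_eq_getElem _ 0 (by omega)).symm
  · rw [if_neg (by omega), if_neg (by tauto), pvGet_eq c a b ha0 haa hb0 (by omega)]

-- true run length starting at (i,j) along v; stable once fuel ≥ 2*(rows-i)+(cols-j)
def runAt (m : List (List Int)) (v : Int × Int) : Nat → Int → Int → Int
  | 0, _, _ => 1
  | f + 1, i, j =>
    if v.1 + i < (m.length : Int) ∧ v.2 + j < pvCols m ∧ v.2 + j > -1 ∧ pvGet m (v.1 + i) (v.2 + j) = pvGet m i j then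
      1 + runAt m v f (v.1 + i) (v.2 + j)
    else 1

def Rv (m : List (List Int)) (v : Int × Int) (i j : Int) : Int :=
  runAt m v (2 * m.length + (pvCols m).toNat) i j

lemma cols_nonneg (m : List (List Int)) : 0 ≤ pvCols m := by
  unfold pvCols; exact Int.natCast_nonneg _

lemma runAt_stable (m : List (List Int)) (v : Int × Int)
    (h1 : 0 ≤ v.1) (_h2 : -1 ≤ v.2) (h3 : 1 ≤ 2 * v.1 + v.2) :
    ∀ (f : Nat) (i j : Int), 0 ≤ i →
      2 * ((m.length : Int) - i) + (pvCols m - j) ≤ (f : Int) →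
      runAt m v f i j = runAt m v (f + 1) i j := by
  intro f
  induction f with
  | zero =>
    intro i j hi hmu
    show (1 : Int) = runAt m v 1 i j
    simp only [runAt]
    split
    · omega
    · rfl
  | succ f ih =>
    intro i j hi hmu
    show runAt m v (f + 1) i j = runAt m v (f + 1 + 1) i j
    simp only [runAt]
    split
    · rw [ih (v.1 + i) (v.2 + j) (by omega) (by omega)]; rfl
    · rfl

lemma runAt_eq_of_le (m : List (List Int)) (v : Int × Int)
    (h1 : 0 ≤ v.1) (h2 : -1 ≤ v.2) (h3 : 1 ≤ 2 * v.1 + v.2)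
    (f g : Nat) (i j : Int) (hi : 0 ≤ i)
    (hmu : 2 * ((m.length : Int) - i) + (pvCols m - j) ≤ (f : Int)) (hfg : f ≤ g) :
    runAt m v f i j = runAt m v g i j := by
  induction g, hfg using Nat.le_induction with
  | base => rfl
  | succ g hfg ih =>
    rw [ih, runAt_stable m v h1 h2 h3 g i j hi (by omega)]

lemma Rv_unfold (m : List (List Int)) (v : Int × Int)
    (h1 : 0 ≤ v.1) (h2 : -1 ≤ v.2) (h3 : 1 ≤ 2 * v.1 + v.2) (i j : Int)
    (hi0 : 0 ≤ i) (hj0 : 0 ≤ j) (hi : i < (m.length : Int)) (hj : j < pvCols m) :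
    Rv m v i j =
      if v.1 + i < (m.length : Int) ∧ v.2 + j < pvCols m ∧ v.2 + j > -1 ∧ pvGet m (v.1 + i) (v.2 + j) = pvGet m i j then
        1 + Rv m v (v.1 + i) (v.2 + j)
      else 1 := by
  have hc0 := cols_nonneg m
  obtain ⟨g, hg⟩ : ∃ g, 2 * m.length + (pvCols m).toNat = g + 1 := ⟨2 * m.length + (pvCols m).toNat - 1, by omega⟩
  unfold Rv
  rw [hg]
  simp only [runAt]
  split
  · rw [runAt_eq_of_le m v h1 h2 h3 g (g + 1) (v.1 + i) (v.2 + j) (by omega) (by omega) (by omega)]; rfl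
  · rfl

-- cache invariant of A's memoized recursion: every cell is unset (0) or the true run length
def CInv (m : List (List Int)) (v : Int × Int) (c : List (List Int)) : Prop :=
  Dims m c ∧ ∀ i j : Int, 0 ≤ i → i < (m.length : Int) → 0 ≤ j → j < pvCols m →
    (pvGet c i j = 0 ∨ pvGet c i j = Rv m v i j)

lemma recurseA_spec (m : List (List Int)) (v : Int × Int)
    (h1 : 0 ≤ v.1) (h2 : -1 ≤ v.2) (h3 : 1 ≤ 2 * v.1 + v.2) :
    ∀ (f : Nat) (i j curr : Int) (c : List (List Int)), 0 ≤ i →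
      2 * ((m.length : Int) - i) + (pvCols m - j) ≤ (f : Int) →
      CInv m v c →
      (recurseA m v f curr i j c).1 =
        (if i < (m.length : Int) ∧ j < pvCols m ∧ j > -1 ∧ pvGet m i j = curr then Rv m v i j else 0) ∧
      CInv m v (recurseA m v f curr i j c).2 := by
  intro f
  induction f with
  | zero =>
    intro i j curr c hi hmu hinv
    refine ⟨?_, hinv⟩
    rw [if_neg (by rintro ⟨g1, g2, g3, -⟩; omega)]
    rfl
  | succ f ih =>
    intro i j curr c hi hmu hinv
    by_cases hg : i < (m.length : Int) ∧ j < pvCols m ∧ j > -1 ∧ pvGet m i j = curr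
    · obtain ⟨hgi, hgj, hgj2, hge⟩ := hg
      by_cases hcache : pvGet c i j > 0
      · have hval : pvGet c i j = Rv m v i j := by
          rcases hinv.2 i j hi hgi (by omega) hgj with h | h
          · omega
          · exact h
        constructor
        · show (if _ then _ else _ : Int × List (List Int)).1 = _
          rw [if_pos ⟨hgi, hgj, hgj2, hge⟩, if_pos hcache, if_pos ⟨hgi, hgj, hgj2, hge⟩]
          exact hval
        · show CInv m v (if _ then _ else _ : Int × List (List Int)).2
          rw [if_pos ⟨hgi, hgj, hgj2, hge⟩, if_pos hcache]
          exact hinv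
      · obtain ⟨hrec, hrinv⟩ := ih (v.1 + i) (v.2 + j) curr c (by omega) (by omega) hinv
        have hvv : 1 + (recurseA m v f curr (v.1 + i) (v.2 + j) c).1 = Rv m v i j := by
          rw [hrec, Rv_unfold m v h1 h2 h3 i j hi (by omega) hgi hgj, hge]
          split <;> omega
        constructor
        · show (if _ then _ else _ : Int × List (List Int)).1 = _
          rw [if_pos ⟨hgi, hgj, hgj2, hge⟩, if_neg hcache, if_pos ⟨hgi, hgj, hgj2, hge⟩]
          exact hvv
        · show CInv m v (if _ then _ else _ : Int × List (List Int)).2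
          rw [if_pos ⟨hgi, hgj, hgj2, hge⟩, if_neg hcache]
          refine ⟨Dims_pvSet m _ hrinv.1 i j _ (by omega) hgi (by omega), ?_⟩
          intro a b ha0 ha hb0 hb
          rw [pvGet_pvSet m _ hrinv.1 i j _ a b (by omega) hgi (by omega) hgj ha0 ha hb0 hb]
          split
          · right
            next hab => rw [hvv, hab.1, hab.2]
          · exact hrinv.2 a b ha0 ha hb0 hb
    · constructor
      · show (if _ then _ else _ : Int × List (List Int)).1 = _
        rw [if_neg hg, if_neg hg]
      · show CInv m v (if _ then _ else _ : Int × List (List Int)).2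
        rw [if_neg hg]
        exact hinv

-- the common pure value both programs reduce to: row-major scan keeping the first strict maximum
def pureScan (m : List (List Int)) (val : Int → Int → Int) : Int × Int × Int :=
  (PySem.List.pyRange 0 (m.length : Int) 1).foldl (fun s i =>
    (PySem.List.pyRange 0 (pvCols m) 1).foldl (fun s j =>
      if val i j > s.2.2 then (i, j, val i j) else s) s) (0, 0, -1)

lemma cache0_inv (m : List (List Int)) (v : Int × Int) :
    CInv m v ((PySem.List.pyRange 0 (m.length : Int) 1).map
      (fun _ => (PySem.List.pyRange 0 (pvCols m) 1).map (fun _ => (0 : Int)))) := by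
  have hc0 := cols_nonneg m
  refine ⟨⟨by simp [PySem.List.length_pyRange_one], ?_⟩, ?_⟩
  · intro r hr
    simp only [List.mem_map] at hr
    obtain ⟨x, -, hx⟩ := hr
    rw [← hx]
    simp [PySem.List.length_pyRange_one]
  · intro i j hi0 hi hj0 hj
    left
    unfold pvGet
    rw [PySem.List.pyGetD_map_pyRange_of_nonneg _ _ _ _ hi0 hi,
        PySem.List.pyGetD_map_pyRange_of_nonneg _ _ _ _ hj0 hj]

lemma A_inner (m : List (List Int)) (v : Int × Int)
    (h1 : 0 ≤ v.1) (h2 : -1 ≤ v.2) (h3 : 1 ≤ 2 * v.1 + v.2)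
    (i : Int) (hi0 : 0 ≤ i) (hi : i < (m.length : Int)) :
    ∀ (js : List Int) (st : List (List Int) × Int × Int × Int),
      (∀ j ∈ js, 0 ≤ j ∧ j < pvCols m) → CInv m v st.1 →
      ∃ c', (js.foldl (fun st j =>
          let curr := pvGet m i j
          let p := recurseA m v (2 * (m.length : Int) + pvCols m).toNat curr i j st.1
          if p.1 > st.2.2.2 then (p.2, i, j, p.1) else (p.2, st.2.1, st.2.2.1, st.2.2.2)) st)
        = (c', js.foldl (fun s j => if Rv m v i j > s.2.2 then (i, j, Rv m v i j) else s) st.2) ∧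
        CInv m v c' := by
  intro js
  induction js with
  | nil => exact fun st _ hinv => ⟨st.1, rfl, hinv⟩
  | cons j js ih =>
    intro st hb hinv
    obtain ⟨hj0, hj⟩ := hb j (by simp)
    have hc0 := cols_nonneg m
    obtain ⟨hr1, hr2⟩ := recurseA_spec m v h1 h2 h3 (2 * (m.length : Int) + pvCols m).toNat
      i j (pvGet m i j) st.1 hi0 (by omega) hinv
    simp only [List.foldl_cons]
    have hgd : i < (m.length : Int) ∧ j < pvCols m ∧ j > -1 ∧ pvGet m i j = pvGet m i j :=
      ⟨hi, hj, by omega, rfl⟩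
    rw [hr1, if_pos hgd]
    by_cases hgt : Rv m v i j > st.2.2.2
    · rw [if_pos hgt, if_pos hgt]
      exact ih _ (fun x hx => hb x (by simp [hx])) hr2
    · rw [if_neg hgt, if_neg hgt]
      exact ih _ (fun x hx => hb x (by simp [hx])) hr2

lemma A_outer (m : List (List Int)) (v : Int × Int)
    (h1 : 0 ≤ v.1) (h2 : -1 ≤ v.2) (h3 : 1 ≤ 2 * v.1 + v.2) :
    ∀ (is : List Int) (st : List (List Int) × Int × Int × Int),
      (∀ i ∈ is, 0 ≤ i ∧ i < (m.length : Int)) → CInv m v st.1 →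
      ∃ c', (is.foldl (fun st i =>
          (PySem.List.pyRange 0 (pvCols m) 1).foldl (fun st j =>
            let curr := pvGet m i j
            let p := recurseA m v (2 * (m.length : Int) + pvCols m).toNat curr i j st.1
            if p.1 > st.2.2.2 then (p.2, i, j, p.1) else (p.2, st.2.1, st.2.2.1, st.2.2.2)) st) st)
        = (c', is.foldl (fun s i =>
            (PySem.List.pyRange 0 (pvCols m) 1).foldl
              (fun s j => if Rv m v i j > s.2.2 then (i, j, Rv m v i j) else s) s) st.2) ∧
        CInv m v c' := by
  intro is
  induction is with
  | nil => exact fun st _ hinv => ⟨st.1, rfl, hinv⟩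
  | cons i is ih =>
    intro st hb hinv
    obtain ⟨hi0, hi⟩ := hb i (by simp)
    obtain ⟨c1, hc1, hinv1⟩ := A_inner m v h1 h2 h3 i hi0 hi
      (PySem.List.pyRange 0 (pvCols m) 1) st
      (fun j hj => by
        rw [PySem.List.mem_pyRange_one] at hj
        exact ⟨hj.1, hj.2⟩) hinv
    rw [List.foldl_cons, List.foldl_cons, hc1]
    exact ih _ (fun x hx => hb x (by simp [hx])) hinv1

lemma maxDirA_eq (m : List (List Int)) (v : Int × Int)
    (h1 : 0 ≤ v.1) (h2 : -1 ≤ v.2) (h3 : 1 ≤ 2 * v.1 + v.2) :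
    maxDirA m v (m.length : Int) (pvCols m) = pureScan m (Rv m v) := by
  obtain ⟨c', hc', -⟩ := A_outer m v h1 h2 h3 (PySem.List.pyRange 0 (m.length : Int) 1)
    (((PySem.List.pyRange 0 (m.length : Int) 1).map
      (fun _ => (PySem.List.pyRange 0 (pvCols m) 1).map (fun _ => (0 : Int)))), 0, 0, -1)
    (fun i hi => by
      rw [PySem.List.mem_pyRange_one] at hi
      exact ⟨hi.1, hi.2⟩) (cache0_inv m v)
  unfold maxDirA pureScan
  simp only
  rw [hc']

lemma desc_cons (t : Nat) :
    (PySem.List.pyRange 0 ((t : Int) + 1) 1).reverse = (t : Int) :: (PySem.List.pyRange 0 (t : Int) 1).reverse := by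
  rw [PySem.List.pyRange_one_succ_right (by omega)]
  simp

lemma B_inner (m : List (List Int)) (v : Int × Int)
    (h1 : 0 ≤ v.1) (h2 : -1 ≤ v.2) (h3 : 1 ≤ 2 * v.1 + v.2)
    (hdir : v.1 = 1 ∨ (v.1 = 0 ∧ v.2 = 1))
    (i : Int) (hi0 : 0 ≤ i) (hi : i < (m.length : Int)) :
    ∀ (t : Nat) (dp : List (List Int)), (t : Int) ≤ pvCols m → Dims m dp →
      (∀ a b : Int, 0 ≤ a → a < (m.length : Int) → 0 ≤ b → b < pvCols m →
        pvGet dp a b = if a > i ∨ (a = i ∧ b ≥ (t : Int)) then Rv m v a b else 1) →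
      Dims m (((PySem.List.pyRange 0 (t : Int) 1).reverse).foldl (fun dp j =>
          let ni := i + v.1
          let nj := j + v.2
          if ni < (m.length : Int) ∧ 0 ≤ nj ∧ nj < pvCols m ∧ pvGet m ni nj = pvGet m i j then
            pvSet dp i j (1 + pvGet dp ni nj)
          else dp) dp) ∧
      (∀ a b : Int, 0 ≤ a → a < (m.length : Int) → 0 ≤ b → b < pvCols m →
        pvGet (((PySem.List.pyRange 0 (t : Int) 1).reverse).foldl (fun dp j =>
          let ni := i + v.1
          let nj := j + v.2
          if ni < (m.length : Int) ∧ 0 ≤ nj ∧ nj < pvCols m ∧ pvGet m ni nj = pvGet m i j then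
            pvSet dp i j (1 + pvGet dp ni nj)
          else dp) dp) a b = if a > i ∨ (a = i ∧ b ≥ (0 : Int)) then Rv m v a b else 1) := by
  intro t
  induction t with
  | zero =>
    intro dp ht hdims hinv
    rw [show ((0 : Nat) : Int) = 0 from rfl, PySem.List.pyRange_one_eq_nil (by omega)]
    simp only [List.reverse_nil, List.foldl_nil]
    exact ⟨hdims, hinv⟩
  | succ t ih =>
    intro dp ht hdims hinv
    rw [show (((t + 1 : Nat)) : Int) = (t : Int) + 1 by push_cast; ring, desc_cons, List.foldl_cons]
    have hnew : Dims m ((fun dp j =>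
          let ni := i + v.1
          let nj := j + v.2
          if ni < (m.length : Int) ∧ 0 ≤ nj ∧ nj < pvCols m ∧ pvGet m ni nj = pvGet m i j then
            pvSet dp i j (1 + pvGet dp ni nj)
          else dp) dp (t : Int)) ∧
        (∀ a b : Int, 0 ≤ a → a < (m.length : Int) → 0 ≤ b → b < pvCols m →
          pvGet ((fun dp j =>
            let ni := i + v.1
            let nj := j + v.2
            if ni < (m.length : Int) ∧ 0 ≤ nj ∧ nj < pvCols m ∧ pvGet m ni nj = pvGet m i j then
              pvSet dp i j (1 + pvGet dp ni nj)
            else dp) dp (t : Int)) a b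
            = if a > i ∨ (a = i ∧ b ≥ (t : Int)) then Rv m v a b else 1) := by
      simp only
      have hrv := Rv_unfold m v h1 h2 h3 i (t : Int) hi0 (by omega) hi (by omega)
      rw [Int.add_comm v.1 i, Int.add_comm v.2 (t : Int)] at hrv
      by_cases hg : i + v.1 < (m.length : Int) ∧ 0 ≤ (t : Int) + v.2 ∧ (t : Int) + v.2 < pvCols m ∧
          pvGet m (i + v.1) ((t : Int) + v.2) = pvGet m i (t : Int)
      · rw [if_pos hg]
        obtain ⟨hg1, hg2, hg3, hg4⟩ := hg
        have hnb : pvGet dp (i + v.1) ((t : Int) + v.2) = Rv m v (i + v.1) ((t : Int) + v.2) := by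
          rw [hinv (i + v.1) ((t : Int) + v.2) (by omega) hg1 hg2 hg3, if_pos (by rcases hdir with h | ⟨ha, hb⟩ <;> omega)]
        have hval : 1 + pvGet dp (i + v.1) ((t : Int) + v.2) = Rv m v i (t : Int) := by
          rw [hnb, hrv, if_pos ⟨hg1, hg3, by omega, hg4⟩]
        refine ⟨Dims_pvSet m dp hdims i (t : Int) _ hi0 hi (by omega), ?_⟩
        intro a b ha0 ha hb0 hb
        rw [pvGet_pvSet m dp hdims i (t : Int) _ a b hi0 hi (by omega) (by omega) ha0 ha hb0 hb]
        by_cases hab : a = i ∧ b = (t : Int)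
        · rw [if_pos hab, if_pos (by omega), hab.1, hab.2, hval]
        · rw [if_neg hab, hinv a b ha0 ha hb0 hb]
          exact if_congr (by omega) rfl rfl
      · rw [if_neg hg]
        have hrv1 : Rv m v i (t : Int) = 1 := by rw [hrv, if_neg (by tauto)]
        refine ⟨hdims, ?_⟩
        intro a b ha0 ha hb0 hb
        rw [hinv a b ha0 ha hb0 hb]
        by_cases hab : a = i ∧ b = (t : Int)
        · rw [if_neg (by omega), if_pos (by omega), hab.1, hab.2, hrv1]
        · exact if_congr (by omega) rfl rfl
    exact ih _ (by omega) hnew.1 hnew.2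

lemma B_outer (m : List (List Int)) (v : Int × Int)
    (h1 : 0 ≤ v.1) (h2 : -1 ≤ v.2) (h3 : 1 ≤ 2 * v.1 + v.2)
    (hdir : v.1 = 1 ∨ (v.1 = 0 ∧ v.2 = 1)) :
    ∀ (r : Nat) (dp : List (List Int)), (r : Int) ≤ (m.length : Int) → Dims m dp →
      (∀ a b : Int, 0 ≤ a → a < (m.length : Int) → 0 ≤ b → b < pvCols m →
        pvGet dp a b = if a ≥ (r : Int) then Rv m v a b else 1) →
      Dims m (((PySem.List.pyRange 0 (r : Int) 1).reverse).foldl (fun dp i =>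
        ((PySem.List.pyRange 0 (pvCols m) 1).reverse).foldl (fun dp j =>
          let ni := i + v.1
          let nj := j + v.2
          if ni < (m.length : Int) ∧ 0 ≤ nj ∧ nj < pvCols m ∧ pvGet m ni nj = pvGet m i j then
            pvSet dp i j (1 + pvGet dp ni nj)
          else dp) dp) dp) ∧
      (∀ a b : Int, 0 ≤ a → a < (m.length : Int) → 0 ≤ b → b < pvCols m →
        pvGet (((PySem.List.pyRange 0 (r : Int) 1).reverse).foldl (fun dp i =>
          ((PySem.List.pyRange 0 (pvCols m) 1).reverse).foldl (fun dp j =>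
            let ni := i + v.1
            let nj := j + v.2
            if ni < (m.length : Int) ∧ 0 ≤ nj ∧ nj < pvCols m ∧ pvGet m ni nj = pvGet m i j then
              pvSet dp i j (1 + pvGet dp ni nj)
            else dp) dp) dp) a b = Rv m v a b) := by
  intro r
  induction r with
  | zero =>
    intro dp hr hdims hinv
    rw [show ((0 : Nat) : Int) = 0 from rfl, PySem.List.pyRange_one_eq_nil (le_refl (0 : Int))]
    simp only [List.reverse_nil, List.foldl_nil]
    refine ⟨hdims, fun a b ha0 ha hb0 hb => ?_⟩
    rw [hinv a b ha0 ha hb0 hb, if_pos (by omega)]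
  | succ r ih =>
    intro dp hr hdims hinv
    rw [show (((r + 1 : Nat)) : Int) = (r : Int) + 1 by push_cast; ring, desc_cons, List.foldl_cons]
    have hcast : ((pvCols m).toNat : Int) = pvCols m := Int.toNat_of_nonneg (cols_nonneg m)
    have hstep := B_inner m v h1 h2 h3 hdir (r : Int) (by omega) (by omega)
      (pvCols m).toNat dp (by have := cols_nonneg m; omega) hdims
      (fun a b ha0 ha hb0 hb => by
        rw [hinv a b ha0 ha hb0 hb]
        exact if_congr (by omega) rfl rfl)
    rw [hcast] at hstep
    exact ih _ (by omega) hstep.1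
      (fun a b ha0 ha hb0 hb => by
        rw [hstep.2 a b ha0 ha hb0 hb]
        exact if_congr (by omega) rfl rfl)

lemma dp0_spec (m : List (List Int)) :
    Dims m ((PySem.List.pyRange 0 (m.length : Int) 1).map (fun _ => PySem.List.pyRepeat [(1 : Int)] (pvCols m))) ∧
    (∀ a b : Int, 0 ≤ a → a < (m.length : Int) → 0 ≤ b → b < pvCols m →
      pvGet ((PySem.List.pyRange 0 (m.length : Int) 1).map (fun _ => PySem.List.pyRepeat [(1 : Int)] (pvCols m))) a b = 1) := by
  have hc0 := cols_nonneg m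
  refine ⟨⟨by simp [PySem.List.length_pyRange_one], ?_⟩, ?_⟩
  · intro r hr
    simp only [List.mem_map] at hr
    obtain ⟨x, -, hx⟩ := hr
    rw [← hx, PySem.List.pyRepeat_singleton, List.length_replicate]
  · intro a b ha0 ha hb0 hb
    unfold pvGet
    rw [PySem.List.pyGetD_map_pyRange_of_nonneg _ _ _ _ ha0 ha, PySem.List.pyRepeat_singleton,
        PySem.List.pyGetD_eq_getElem _ _ hb0 (by rw [List.length_replicate]; omega),
        List.getElem_replicate]

lemma altDp_spec (m : List (List Int)) (v : Int × Int)
    (h1 : 0 ≤ v.1) (h2 : -1 ≤ v.2) (h3 : 1 ≤ 2 * v.1 + v.2)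
    (hdir : v.1 = 1 ∨ (v.1 = 0 ∧ v.2 = 1)) (a b : Int)
    (ha0 : 0 ≤ a) (ha : a < (m.length : Int)) (hb0 : 0 ≤ b) (hb : b < pvCols m) :
    pvGet (altDp m v (m.length : Int) (pvCols m)) a b = Rv m v a b := by
  have h := B_outer m v h1 h2 h3 hdir m.length
    ((PySem.List.pyRange 0 (m.length : Int) 1).map (fun _ => PySem.List.pyRepeat [(1 : Int)] (pvCols m)))
    (by omega) (dp0_spec m).1
    (fun a b ha0 ha hb0 hb => by
      rw [(dp0_spec m).2 a b ha0 ha hb0 hb, if_neg (by omega)])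
  exact h.2 a b ha0 ha hb0 hb

lemma pureScan_congr (m : List (List Int)) (f g : Int → Int → Int)
    (h : ∀ i j : Int, 0 ≤ i → i < (m.length : Int) → 0 ≤ j → j < pvCols m → f i j = g i j) :
    pureScan m f = pureScan m g := by
  unfold pureScan
  refine PySem.List.foldl_congr_mem _ _ _ _ (fun acc i hi => ?_)
  rw [PySem.List.mem_pyRange_one] at hi
  refine PySem.List.foldl_congr_mem _ _ _ _ (fun acc2 j hj => ?_)
  rw [PySem.List.mem_pyRange_one] at hj
  rw [h i j hi.1 hi.2 hj.1 hj.2]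

lemma altB_eq (m : List (List Int)) (v : Int × Int)
    (h1 : 0 ≤ v.1) (h2 : -1 ≤ v.2) (h3 : 1 ≤ 2 * v.1 + v.2)
    (hdir : v.1 = 1 ∨ (v.1 = 0 ∧ v.2 = 1)) :
    altScan (altDp m v (m.length : Int) (pvCols m)) (m.length : Int) (pvCols m) = pureScan m (Rv m v) := by
  have : altScan (altDp m v (m.length : Int) (pvCols m)) (m.length : Int) (pvCols m)
      = pureScan m (fun i j => pvGet (altDp m v (m.length : Int) (pvCols m)) i j) := rfl
  rw [this]
  exact pureScan_congr m _ _ (fun i j hi0 hi hj0 hj => altDp_spec m v h1 h2 h3 hdir i j hi0 hi hj0 hj)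

theorem solve_eq (m : List (List Int)) : solve_matrix m = solve_matrix_alt m := by
  unfold solve_matrix solve_matrix_alt
  dsimp only
  rw [show PySem.List.pyRange 0 (([((0:Int),(1:Int)),(1,1),(1,0),(1,-1)] : List (Int × Int)).length : Int) 1
        = [0, 1, 2, 3] from by decide]
  simp only [List.foldl_cons, List.foldl_nil]
  rw [show (PySem.List.pyGetD [((0:Int),(1:Int)),(1,1),(1,0),(1,-1)] 0 ((0:Int),(0:Int))) = ((0:Int),(1:Int)) from by decide,
      show (PySem.List.pyGetD [((0:Int),(1:Int)),(1,1),(1,0),(1,-1)] 1 ((0:Int),(0:Int))) = ((1:Int),(1:Int)) from by decide,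
      show (PySem.List.pyGetD [((0:Int),(1:Int)),(1,1),(1,0),(1,-1)] 2 ((0:Int),(0:Int))) = ((1:Int),(0:Int)) from by decide,
      show (PySem.List.pyGetD [((0:Int),(1:Int)),(1,1),(1,0),(1,-1)] 3 ((0:Int),(0:Int))) = ((1:Int),(-1:Int)) from by decide]
  rw [maxDirA_eq m ((0:Int),(1:Int)) (by norm_num) (by norm_num) (by norm_num),
      maxDirA_eq m ((1:Int),(1:Int)) (by norm_num) (by norm_num) (by norm_num),
      maxDirA_eq m ((1:Int),(0:Int)) (by norm_num) (by norm_num) (by norm_num),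
      maxDirA_eq m ((1:Int),(-1:Int)) (by norm_num) (by norm_num) (by norm_num),
      altB_eq m ((0:Int),(1:Int)) (by norm_num) (by norm_num) (by norm_num) (Or.inr ⟨rfl, rfl⟩),
      altB_eq m ((1:Int),(1:Int)) (by norm_num) (by norm_num) (by norm_num) (Or.inl rfl),
      altB_eq m ((1:Int),(0:Int)) (by norm_num) (by norm_num) (by norm_num) (Or.inl rfl),
      altB_eq m ((1:Int),(-1:Int)) (by norm_num) (by norm_num) (by norm_num) (Or.inl rfl)]

-- ===== VERDICT (by name: the statement is the Claim_ definition above) =====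
theorem solve_matrix_spec : Claim_equal_solve_matrix := by
  intro matrix _ _
  unfold Spec_solve_matrix
  exact solve_eq matrix
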